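-- pv_equiv track=rewrite | github.com/jcraig949jfi/Prometheus | prometheus_math/combinatorics_partitions.py | rsk
-- ===== SOURCE A (Python) =====
-- from typing import Iterator, List, Sequence, Tuple
--
-- def _row_insert(P: List[List[int]], x: int) -> Tuple[int, int]:
--     """Schensted row-insertion of ``x`` into tableau ``P`` (modifies P).
--
--     Returns the (row, col) coordinates of the cell where the bumping
--     cascade finally settles.
--     """
--     r = 0
--     while True:
--         if r == len(P):
--             P.append([x])
--             return (r, 0)
--         row = P[r]
--         # Find the leftmost element in row strictly greater than x.
--         idx = None
--         for k, val in enumerate(row):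
--             if val > x:
--                 idx = k
--                 break
--         if idx is None:
--             row.append(x)
--             return (r, len(row) - 1)
--         # Bump.
--         bumped = row[idx]
--         row[idx] = x
--         x = bumped
--         r += 1
--
-- def rsk(permutation: Sequence[int]) -> Tuple[List[List[int]], List[List[int]]]:
--     """Robinson-Schensted-Knuth correspondence on a permutation.
--
--     Returns
--     -------
--     (P, Q) : (insertion tableau, recording tableau).
--
--     Reference: Sagan (2001), Section 3.5.
--     """
--     P: List[List[int]] = []
--     Q: List[List[int]] = []
--     for step, x in enumerate(permutation, start=1):
--         i, j = _row_insert(P, x)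
--         # Add (step) to Q at the same cell (i, j).
--         if i == len(Q):
--             Q.append([step])
--         else:
--             Q[i].append(step)
--     return P, Q
-- ===== SOURCE B (Python) =====
-- def _pos(row, x):
--     """Index just after the rightmost element of ``row`` that is <= x (0 if none)."""
--     if not row:
--         return 0
--     p = _pos(row[1:], x)
--     if p:
--         return p + 1
--     return 1 if row[0] <= x else 0
--
-- def rsk(permutation):
--     """RSK built row by row: each pass settles one full row of P (and of Q),
--     collecting the bumped (label, value) pairs for the next row's pass."""
--     pairs = [(s, x) for s, x in enumerate(permutation, start=1)]
--     P, Q = [], []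
--     while pairs:
--         row, qrow, nxt = [], [], []
--         for s, x in pairs:
--             p = _pos(row, x)
--             if p == len(row):
--                 row.append(x)
--                 qrow.append(s)
--             else:
--                 nxt.append((s, row[p]))
--                 row[p] = x
--         P.append(row)
--         Q.append(qrow)
--         pairs = nxt
--     return P, Q
-- ===== Notes on version B (the rewrite author's own statement) =====
-- stated objective: alternative
-- what changed: B builds the tableaux row by row: each pass over the whole (label,value) pair list settles one complete row of P and Q (finding positions by a rightmost-scan recursion on the weakly increasing row) and collects the bumped pairs as the input of the next pass, replacing A's element-by-element Schensted insertion with its top-down bumping cascade.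
import Mathlib
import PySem

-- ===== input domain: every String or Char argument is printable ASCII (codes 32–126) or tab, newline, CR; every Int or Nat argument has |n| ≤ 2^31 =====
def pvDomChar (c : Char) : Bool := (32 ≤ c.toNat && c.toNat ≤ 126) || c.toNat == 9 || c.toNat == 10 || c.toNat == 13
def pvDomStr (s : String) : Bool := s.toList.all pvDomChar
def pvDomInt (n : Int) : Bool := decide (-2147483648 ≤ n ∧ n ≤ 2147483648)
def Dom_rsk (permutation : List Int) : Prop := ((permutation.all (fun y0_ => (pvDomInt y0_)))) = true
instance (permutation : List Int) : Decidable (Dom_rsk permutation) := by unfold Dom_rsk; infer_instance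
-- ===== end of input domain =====

-- B rebuilds RSK row by row (one whole pass of the input per tableau row, bumped pairs
-- feeding the next pass) instead of A's element-by-element bumping cascade; objective: alternative.

-- ===== PORT A =====
-- enumerate(permutation, start=1) as (step, value) pairs (shared labelling helper)
def labelFrom : List Int → Int → List (Int × Int)
  | [], _ => []
  | x :: t, s => (s, x) :: labelFrom t (s + 1)

-- the `for k, val in enumerate(row): if val > x: idx = k; break` loop of _row_insert
def findA : List Int → Int → Option Nat
  | [], _ => none
  | v :: t, x => if v > x then some 0 else (findA t x).map (· + 1)

-- _row_insert: the `while True` over rows r = 0,1,… becomes structural recursion on P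
def rowInsertA : List (List Int) → Int → List (List Int) × Nat × Nat
  | [], x => ([[x]], 0, 0)
  | row :: rest, x =>
    match findA row x with
    | none => ((row ++ [x]) :: rest, 0, (row ++ [x]).length - 1)
    | some k =>
      let bumped := row.getD k 0
      let res := rowInsertA rest bumped
      ((row.set k x) :: res.1, res.2.1 + 1, res.2.2)

-- one iteration of A's main loop: insert x into P, record step in Q at row i
def stepA (st : List (List Int) × List (List Int)) (sx : Int × Int) :
    List (List Int) × List (List Int) :=
  let res := rowInsertA st.1 sx.2
  let i := res.2.1
  (res.1, if i = st.2.length then st.2 ++ [[sx.1]] else st.2.modify i (· ++ [sx.1]))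

def rsk (permutation : List Int) : List (List Int) × List (List Int) :=
  List.foldl stepA ([], []) (labelFrom permutation 1)

-- ===== PORT B =====
-- _pos: index just after the rightmost element ≤ x (0 if none)
def posB : List Int → Int → Nat
  | [], _ => 0
  | a :: t, x =>
    let p := posB t x
    if p = 0 then (if a ≤ x then 1 else 0) else p + 1

-- one pass of B's inner for-loop over `pairs`, building one row of P and Q
-- and the list `nxt` of bumped (step, value) pairs
def passB : List (Int × Int) → List Int → List Int → List (Int × Int) →
    List Int × List Int × List (Int × Int)
  | [], row, qrow, out => (row, qrow, out)
  | (s, x) :: t, row, qrow, out =>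
    let p := posB row x
    if p = row.length then passB t (row ++ [x]) (qrow ++ [s]) out
    else passB t (row.set p x) qrow (out ++ [(s, row.getD p 0)])

theorem passB_out_len : ∀ (w : List (Int × Int)) (row qrow : List Int) (out : List (Int × Int)),
    ((passB w row qrow out).2.2).length ≤ out.length + w.length := by
  intro w
  induction w with
  | nil => intro row qrow out; simp [passB]
  | cons p t ih =>
    intro row qrow out
    obtain ⟨s, x⟩ := p
    simp only [passB]
    split
    · have := ih (row ++ [x]) (qrow ++ [s]) out
      simp only [List.length_cons]; omega
    · have := ih (row.set (posB row x) x) qrow (out ++ [(s, row.getD (posB row x) 0)])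
      simp only [List.length_append, List.length_cons, List.length_nil] at this ⊢; omega

theorem passB_nxt_lt (s x : Int) (t : List (Int × Int)) :
    ((passB ((s, x) :: t) [] [] []).2.2).length < ((s, x) :: t).length := by
  have h : passB ((s, x) :: t) [] [] [] = passB t [x] [s] [] := by simp [passB, posB]
  rw [h]
  have := passB_out_len t [x] [s] []
  simp only [List.length_nil, List.length_cons] at this ⊢; omega

-- B's outer while-loop: each pass produces one row; recursion on the shrinking pair list
def rskRows : List (Int × Int) → List (List Int) × List (List Int)
  | [] => ([], [])
  | (s, x) :: t =>
    let res := passB ((s, x) :: t) [] [] []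
    have : res.2.2.length < ((s, x) :: t).length := passB_nxt_lt s x t
    let rest := rskRows res.2.2
    (res.1 :: rest.1, res.2.1 :: rest.2)
termination_by w => w.length
decreasing_by simp only [List.length_cons] at *; omega

def rsk_alt (permutation : List Int) : List (List Int) × List (List Int) :=
  rskRows (labelFrom permutation 1)

-- ===== PRECONDITION & SPEC =====
def Spec_rsk (permutation : List Int) (out : List (List Int) × List (List Int)) : Prop := out = rsk_alt permutation
instance (permutation : List Int) (out : List (List Int) × List (List Int)) : Decidable (Spec_rsk permutation out) := by unfold Spec_rsk; infer_instance

-- ===== CLAIM (what is proved, stated in full; the proofs are below) =====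
def Claim_equal_rsk : Prop := ∀ (permutation : List Int), Dom_rsk permutation → Spec_rsk permutation (rsk permutation)

-- ===== LEMMAS AND PROOFS =====

theorem posB_zero {t : List Int} {x : Int} (h : ∀ a ∈ t, x < a) : posB t x = 0 := by
  induction t with
  | nil => simp [posB]
  | cons a t ih =>
    have hx : ¬ a ≤ x := by have := h a (by simp); omega
    simp only [posB, ih (fun b hb => h b (by simp [hb]))]
    simp [hx]

theorem findA_none {row : List Int} {x : Int} (h : findA row x = none) :
    ∀ v ∈ row, v ≤ x := by
  induction row with
  | nil => simp
  | cons v t ih =>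
    simp only [findA] at h
    split at h
    · exact absurd h (by simp)
    · intro u hu
      rcases List.mem_cons.1 hu with rfl | hu
      · omega
      · exact ih (by cases hf : findA t x <;> simp [hf] at h ⊢) u hu

-- with the row sorted, B's right-scan position agrees with A's leftmost-greater scan
theorem posB_eq_findA {row : List Int} (x : Int) (h : List.Pairwise (· ≤ ·) row) :
    posB row x = (match findA row x with | none => row.length | some k => k) := by
  induction row with
  | nil => simp [posB, findA]
  | cons v t ih =>
    rcases List.pairwise_cons.1 h with ⟨hv, ht⟩
    by_cases hvx : v > x
    · have hall : ∀ a ∈ t, x < a := fun a ha => by have := hv a ha; omega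
      simp [posB, findA, hvx, posB_zero hall]
    · have hvx' : v ≤ x := by omega
      have iht := ih ht
      simp only [findA, if_neg hvx]
      cases hf : findA t x with
      | none =>
        simp [hf] at iht
        simp only [posB, iht, hf]
        by_cases h0 : t.length = 0
        · simp [h0, hvx']
        · simp [h0]
      | some k =>
        simp [hf] at iht
        simp only [posB, iht, hf]
        by_cases h0 : k = 0
        · simp [h0, hvx']
        · simp [h0]

theorem findA_some_lt {row : List Int} {x : Int} {k : Nat} (h : findA row x = some k) :
    k < row.length := by
  induction row generalizing k with
  | nil => simp [findA] at h
  | cons v t ih =>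
    simp only [findA, List.length_cons] at h ⊢
    split at h
    · simp at h; omega
    · cases hf : findA t x with
      | none => simp [hf] at h
      | some k' => simp [hf] at h; have := ih hf; omega

theorem sorted_set {row : List Int} {x : Int} {k : Nat}
    (hs : List.Pairwise (· ≤ ·) row) (h : findA row x = some k) :
    List.Pairwise (· ≤ ·) (row.set k x) := by
  induction row generalizing k with
  | nil => simp [findA] at h
  | cons v t ih =>
    rcases List.pairwise_cons.1 hs with ⟨hv, ht⟩
    simp only [findA] at h
    split at h
    · -- v > x, k = 0 : new list x :: t
      rename_i hvx
      simp at h; subst h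
      simp only [List.set]
      exact List.pairwise_cons.2 ⟨fun b hb => by have := hv b hb; omega, ht⟩
    · rename_i hvx
      cases hf : findA t x with
      | none => simp [hf] at h
      | some k' =>
        simp [hf] at h; subst h
        simp only [List.set]
        refine List.pairwise_cons.2 ⟨?_, ih ht hf⟩
        intro b hb
        rcases List.mem_or_eq_of_mem_set hb with hb | rfl
        · exact hv b hb
        · omega

theorem sorted_append {row : List Int} {x : Int}
    (hs : List.Pairwise (· ≤ ·) row) (h : findA row x = none) :
    List.Pairwise (· ≤ ·) (row ++ [x]) := by
  refine List.pairwise_append.2 ⟨hs, by simp, ?_⟩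
  intro a ha b hb
  simp at hb; subst hb
  exact findA_none h a ha

-- A's accumulated state, for the invariant
def fullA (w : List (Int × Int)) : List (List Int) × List (List Int) :=
  List.foldl stepA ([], []) w

-- the central invariant: running A's loop from a state whose head row/qrow are explicit
-- and whose deeper rows are A's state on `out` equals finishing B's current pass
theorem inv_lemma : ∀ (u : List (Int × Int)) (row qrow : List Int) (out : List (Int × Int)),
    List.Pairwise (· ≤ ·) row →
    List.foldl stepA (row :: (fullA out).1, qrow :: (fullA out).2) u
      = ((passB u row qrow out).1 :: (fullA (passB u row qrow out).2.2).1,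
         (passB u row qrow out).2.1 :: (fullA (passB u row qrow out).2.2).2) := by
  intro u
  induction u with
  | nil => intro row qrow out _; simp [passB]
  | cons p t ih =>
    intro row qrow out hs
    obtain ⟨s, x⟩ := p
    rw [List.foldl_cons]
    have hp := posB_eq_findA (row := row) x hs
    cases hf : findA row x with
    | none =>
      -- append case: x settles at the end of this row
      have hpos : posB row x = row.length := by rw [hp, hf]
      have hstep : stepA (row :: (fullA out).1, qrow :: (fullA out).2) (s, x)
          = ((row ++ [x]) :: (fullA out).1, (qrow ++ [s]) :: (fullA out).2) := by
        simp only [stepA, rowInsertA, hf]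
        simp [List.modify]
      rw [hstep]
      have := ih (row ++ [x]) (qrow ++ [s]) out (sorted_append hs hf)
      rw [this]
      simp only [passB, hpos, if_pos rfl]
      simp
    | some k =>
      -- bump case: x replaces row[k]; the bumped value cascades into the tail state
      have hpos : posB row x = k := by rw [hp, hf]
      have hklt : k < row.length := findA_some_lt hf
      have hkne : ¬ (k = row.length) := by omega
      have hstep : stepA (row :: (fullA out).1, qrow :: (fullA out).2) (s, x)
          = ((row.set k x) :: (stepA (fullA out) (s, row.getD k 0)).1,
             qrow :: (stepA (fullA out) (s, row.getD k 0)).2) := by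
        simp only [stepA, rowInsertA, hf, List.length_cons]
        have hiff : ((rowInsertA (fullA out).1 (row.getD k 0)).2.1 + 1
              = (fullA out).2.length + 1)
            ↔ ((rowInsertA (fullA out).1 (row.getD k 0)).2.1 = (fullA out).2.length) := by
          omega
        simp only [hiff]
        split_ifs with he
        · rfl
        · simp only [List.modify_succ_cons]
      rw [hstep]
      have hfold : stepA (fullA out) (s, row.getD k 0) = fullA (out ++ [(s, row.getD k 0)]) := by
        simp [fullA, List.foldl_append]
      rw [hfold]
      have := ih (row.set k x) qrow (out ++ [(s, row.getD k 0)]) (sorted_set hs hf)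
      rw [this]
      simp only [passB, hpos, hkne, if_false]

theorem rskRows_eq_fullA_aux : ∀ (n : Nat) (w : List (Int × Int)), w.length ≤ n →
    fullA w = rskRows w := by
  intro n
  induction n with
  | zero =>
    intro w hw
    cases w with
    | nil => simp [fullA, rskRows]
    | cons p t => simp at hw
  | succ n ih => ?_
  intro w hw
  cases w with
  | nil => simp [fullA, rskRows]
  | cons p t =>
    obtain ⟨s, x⟩ := p
    have hfirst : passB ((s, x) :: t) [] [] [] = passB t [x] [s] [] := by
      simp [passB, posB]
    have hstep0 : stepA ([], []) (s, x) = ([x] :: (fullA []).1, [s] :: (fullA []).2) := by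
      simp [stepA, rowInsertA, fullA, findA]
    have h1 : fullA ((s, x) :: t)
        = ((passB t [x] [s] []).1 :: (fullA (passB t [x] [s] []).2.2).1,
           (passB t [x] [s] []).2.1 :: (fullA (passB t [x] [s] []).2.2).2) := by
      have := inv_lemma t [x] [s] [] (by simp)
      calc fullA ((s, x) :: t)
          = List.foldl stepA ([x] :: (fullA []).1, [s] :: (fullA []).2) t := by
            rw [fullA, List.foldl_cons, hstep0]
        _ = _ := this
    have hlt : ((passB ((s, x) :: t) [] [] []).2.2).length < ((s, x) :: t).length :=
      passB_nxt_lt s x t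
    rw [hfirst] at hlt
    have ihn := ih (passB t [x] [s] []).2.2 (by simp at hw hlt; omega)
    rw [rskRows, hfirst]
    rw [h1, ihn]

theorem rskRows_eq_fullA (w : List (Int × Int)) : fullA w = rskRows w :=
  rskRows_eq_fullA_aux w.length w le_rfl

-- ===== VERDICT (by name: the statement is the Claim_ definition above) =====
theorem rsk_spec : Claim_equal_rsk := by
  intro permutation _
  unfold Spec_rsk rsk rsk_alt
  exact rskRows_eq_fullA (labelFrom permutation 1)
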